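-- pv_equiv track=rewrite | github.com/Commander-Vimes/TCG-Hand-Calculator | Streamit MTG Hand Calculator.py | all_possible_hands
-- ===== SOURCE A (Python) =====
-- from itertools import product
--
-- def all_possible_hands(deck_counts, hand_size):
--     types = [k for k in deck_counts if deck_counts[k] > 0]
--     ranges = [range(0, min(deck_counts[t], hand_size)+1) for t in types]
--     hands = []
--     for counts in product(*ranges):
--         if sum(counts) == hand_size:
--             hand = dict(zip(types, counts))
--             hands.append(hand)
--     return hands
-- ===== SOURCE B (Python) =====
-- def all_possible_hands(deck_counts, hand_size):
--     types = [k for k in deck_counts if deck_counts[k] > 0]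
--
--     def dfs(i, remaining):
--         if i == len(types):
--             return [{}] if remaining == 0 else []
--         t = types[i]
--         cap = min(deck_counts[t], remaining)
--         res = []
--         for c in range(0, cap + 1):
--             for tail in dfs(i + 1, remaining - c):
--                 hand = {t: c}
--                 hand.update(tail)
--                 res.append(hand)
--         return res
--
--     return dfs(0, hand_size)
-- ===== Notes on version B (the rewrite author's own statement) =====
-- stated objective: alternative
-- what changed: Replaces the full cartesian product of per-type count ranges filtered by sum with a recursive DFS that threads the remaining hand size, capping each count by min(count, remaining) so branches exceeding the hand size are pruned instead of enumerated.
import Mathlib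
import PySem

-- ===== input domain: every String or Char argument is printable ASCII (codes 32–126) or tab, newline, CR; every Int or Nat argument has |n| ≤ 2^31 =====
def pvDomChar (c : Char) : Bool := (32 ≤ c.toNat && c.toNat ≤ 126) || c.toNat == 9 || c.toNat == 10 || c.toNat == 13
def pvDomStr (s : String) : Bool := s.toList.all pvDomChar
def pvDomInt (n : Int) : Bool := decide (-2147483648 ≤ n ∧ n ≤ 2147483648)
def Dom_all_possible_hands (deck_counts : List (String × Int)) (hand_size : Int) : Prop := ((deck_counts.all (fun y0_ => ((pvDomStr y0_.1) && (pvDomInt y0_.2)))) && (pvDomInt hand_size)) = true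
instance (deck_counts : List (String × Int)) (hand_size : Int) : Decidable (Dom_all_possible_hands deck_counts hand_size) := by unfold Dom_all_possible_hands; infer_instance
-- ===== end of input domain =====

-- B replaces A's filtered cartesian product by a DFS on the remaining hand size that prunes
-- count branches exceeding the hand size (objective: alternative).
-- The dict parameter is its association list (distinct keys, insertion order), so iterating
-- the dict's keys with `deck_counts[k]` is iterating the pairs.

-- ===== PORT A =====
-- itertools.product(*ranges), rightmost range advancing fastest
def pvProdA : List (List Int) → List (List Int)
  | [] => [[]]
  | r :: rs => r.flatMap (fun x => (pvProdA rs).map (fun t => x :: t))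

def all_possible_hands (deck_counts : List (String × Int)) (hand_size : Int) : List (List (String × Int)) :=
  let types := deck_counts.filter (fun kv => decide (kv.2 > 0))
  let ranges := types.map (fun kv => PySem.List.pyRange 0 (min kv.2 hand_size + 1) 1)
  (pvProdA ranges).foldl
    (fun hands counts =>
      if counts.sum == hand_size then hands ++ [List.zip (types.map Prod.fst) counts]
      else hands) []

-- ===== PORT B =====
-- dfs(i, remaining): choose a count 0..min(cap, remaining) for the current type, recurse
def pvDfsB : List (String × Int) → Int → List (List (String × Int))
  | [], remaining => if remaining == 0 then [[]] else []
  | (t, cap) :: rest, remaining =>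
      (PySem.List.pyRange 0 (min cap remaining + 1) 1).flatMap
        (fun c => (pvDfsB rest (remaining - c)).map (fun tail => (t, c) :: tail))

def all_possible_hands_alt (deck_counts : List (String × Int)) (hand_size : Int) : List (List (String × Int)) :=
  pvDfsB (deck_counts.filter (fun kv => decide (kv.2 > 0))) hand_size

-- ===== PRECONDITION & SPEC =====
def Spec_all_possible_hands (deck_counts : List (String × Int)) (hand_size : Int) (out : List (List (String × Int))) : Prop := out = all_possible_hands_alt deck_counts hand_size
instance (deck_counts : List (String × Int)) (hand_size : Int) (out : List (List (String × Int))) : Decidable (Spec_all_possible_hands deck_counts hand_size out) := by unfold Spec_all_possible_hands; infer_instance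

-- ===== CLAIM (what is proved, stated in full; the proofs are below) =====
def Claim_equal_all_possible_hands : Prop := ∀ (deck_counts : List (String × Int)) (hand_size : Int), Dom_all_possible_hands deck_counts hand_size → Spec_all_possible_hands deck_counts hand_size (all_possible_hands deck_counts hand_size)

-- ===== LEMMAS AND PROOFS =====

-- A's filtered product over the types ts with global bound H, keeping tuples of sum `rem`
def pvFilt (ts : List (String × Int)) (H rem : Int) : List (List (String × Int)) :=
  ((pvProdA (ts.map (fun kv => PySem.List.pyRange 0 (min kv.2 H + 1) 1))).filter
      (fun cs => cs.sum == rem)).map (fun cs => List.zip (ts.map Prod.fst) cs)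

lemma pvFilt_nil (H rem : Int) :
    pvFilt [] H rem = if rem == 0 then [[]] else [] := by
  by_cases h : rem = 0
  · simp [pvFilt, pvProdA, h]
  · simp [pvFilt, pvProdA, h]
    omega

lemma pvFilt_cons (t : String) (cap : Int) (ts : List (String × Int)) (H rem : Int) :
    pvFilt ((t, cap) :: ts) H rem =
      (PySem.List.pyRange 0 (min cap H + 1) 1).flatMap
        (fun c => (pvFilt ts H (rem - c)).map (fun tail => (t, c) :: tail)) := by
  simp only [pvFilt, List.map_cons, pvProdA, List.filter_flatMap, List.map_flatMap]
  refine List.flatMap_congr ?_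
  intro c _
  rw [List.filter_map, List.map_map]
  have h1 : ∀ (l : List (List Int)), l.filter ((fun cs => cs.sum == rem) ∘ (fun t1 => c :: t1)) = l.filter (fun cs => cs.sum == rem - c) := by
    intro l
    apply List.filter_congr
    intro cs _
    simp only [Function.comp, List.sum_cons]
    rw [Bool.eq_iff_iff]
    simp only [beq_iff_eq]
    omega
  rw [h1, List.map_map]
  rfl

lemma pvFilt_neg (ts : List (String × Int)) (H rem : Int) (h : rem < 0) :
    pvFilt ts H rem = [] := by
  induction ts generalizing rem with
  | nil => simp [pvFilt_nil]; omega
  | cons kv ts ih =>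
      obtain ⟨t, cap⟩ := kv
      rw [pvFilt_cons]
      apply List.flatMap_eq_nil_iff.mpr
      intro c hc
      rw [PySem.List.mem_pyRange_one] at hc
      rw [ih (rem - c) (by omega)]
      simp

-- splitting an increasing pyRange at an interior point
lemma pvRange_split (a b c : Int) (hab : a ≤ b) (hbc : b ≤ c) :
    PySem.List.pyRange a c 1 = PySem.List.pyRange a b 1 ++ PySem.List.pyRange b c 1 := by
  simp only [PySem.List.pyRange_one]
  have h1 : (c - a).toNat = (b - a).toNat + (c - b).toNat := by omega
  rw [h1, List.range_add, List.map_append, List.map_map]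
  congr 1
  apply List.map_congr_left
  intro k _
  simp [Function.comp]
  omega

lemma pvDfsB_eq_pvFilt (ts : List (String × Int)) (H rem : Int)
    (hpos : ∀ kv ∈ ts, 0 < kv.2) (hrem : rem ≤ H) :
    pvDfsB ts rem = pvFilt ts H rem := by
  induction ts generalizing rem with
  | nil =>
      rw [pvFilt_nil]; rfl
  | cons kv ts ih =>
      obtain ⟨t, cap⟩ := kv
      rw [pvFilt_cons]
      show (PySem.List.pyRange 0 (min cap rem + 1) 1).flatMap
          (fun c => (pvDfsB ts (rem - c)).map (fun tail => (t, c) :: tail)) = _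
      by_cases hr : rem < 0
      · rw [PySem.List.pyRange_one_eq_nil (by omega)]
        symm
        apply List.flatMap_eq_nil_iff.mpr
        intro c hc
        rw [PySem.List.mem_pyRange_one] at hc
        rw [pvFilt_neg ts H (rem - c) (by omega)]
        simp
      · push Not at hr
        have hcap : 0 < cap := hpos (t, cap) (List.mem_cons_self ..)
        have hsplit := pvRange_split 0 (min cap rem + 1) (min cap H + 1)
          (by omega) (by omega)
        rw [hsplit, List.flatMap_append]
        have h2 : (PySem.List.pyRange (min cap rem + 1) (min cap H + 1) 1).flatMap
            (fun c => (pvFilt ts H (rem - c)).map (fun tail => (t, c) :: tail)) = [] := by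
          apply List.flatMap_eq_nil_iff.mpr
          intro c hc
          rw [PySem.List.mem_pyRange_one] at hc
          rw [pvFilt_neg ts H (rem - c) (by omega)]
          simp
        rw [h2, List.append_nil]
        refine List.flatMap_congr ?_
        intro c hc
        rw [PySem.List.mem_pyRange_one] at hc
        rw [ih (rem - c) (fun kv hkv => hpos kv (List.mem_cons_of_mem _ hkv)) (by omega)]

-- ===== VERDICT (by name: the statement is the Claim_ definition above) =====
theorem all_possible_hands_spec : Claim_equal_all_possible_hands := by
  intro deck_counts hand_size _
  show all_possible_hands deck_counts hand_size = all_possible_hands_alt deck_counts hand_size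
  unfold all_possible_hands all_possible_hands_alt
  rw [PySem.List.foldl_append_if, List.nil_append,
    pvDfsB_eq_pvFilt _ hand_size hand_size
      (fun kv hkv => by simpa using (List.of_mem_filter hkv)) le_rfl]
  rfl
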